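-- pv_equiv track=rewrite | github.com/denv3rr/clear | modules/client_mgr/toolkit.py | _discretize
-- ===== SOURCE A (Python) =====
-- def _discretize(returns, bins):
--     out = []
--     for r in returns:
--         for i in range(len(bins) - 1):
--             if bins[i] <= r < bins[i + 1]:
--                 out.append(i)
--                 break
--     return out
-- ===== SOURCE B (Python) =====
-- def _discretize(returns, bins):
--     # Transposed traversal: instead of scanning all bin edges per return value,
--     # loop over the intervals once and assign each still-unanswered return value
--     # to the first interval that contains it; the pending set shrinks as values
--     # are answered and the loop stops early once nothing is pending.
--     res = [None] * len(returns)
--     pending = list(range(len(returns)))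
--     for i in range(len(bins) - 1):
--         if not pending:
--             break
--         a, b = bins[i], bins[i + 1]
--         if a < b:
--             still = []
--             for q in pending:
--                 if a <= returns[q] < b:
--                     res[q] = i
--                 else:
--                     still.append(q)
--             pending = still
--     return [v for v in res if v is not None]
-- ===== Notes on version B (the rewrite author's own statement) =====
-- stated objective: faster
-- what changed: Transposes the two loops: instead of scanning the bin edges afresh for every return value, B makes one ascending pass over the intervals, assigning each still-pending return value to the first interval containing it, skipping empty intervals in O(1), and stopping early once nothing is pending; answers are emitted in original order.
import Mathlib
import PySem

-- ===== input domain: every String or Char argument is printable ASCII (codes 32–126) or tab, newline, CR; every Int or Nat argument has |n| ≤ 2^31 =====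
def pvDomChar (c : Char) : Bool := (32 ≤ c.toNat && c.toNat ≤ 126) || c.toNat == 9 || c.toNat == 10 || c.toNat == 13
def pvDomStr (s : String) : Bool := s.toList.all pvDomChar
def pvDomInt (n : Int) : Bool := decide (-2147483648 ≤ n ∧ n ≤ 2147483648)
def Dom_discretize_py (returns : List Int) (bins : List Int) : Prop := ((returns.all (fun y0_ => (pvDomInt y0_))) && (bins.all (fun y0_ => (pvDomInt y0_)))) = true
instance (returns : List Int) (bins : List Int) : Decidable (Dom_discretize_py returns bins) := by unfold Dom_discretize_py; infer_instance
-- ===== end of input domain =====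

-- B transposes the loops: one ascending pass over the intervals assigns each still-pending
-- return value to the first interval containing it (same results, a different traversal).

-- ===== PORT A =====
-- inner loop of A: for i in range(len(bins)-1): if bins[i] <= r < bins[i+1]: return i (break)
def discretizeInner (r : Int) (bins : List Int) (i : Nat) : Option Nat :=
  if _h : i + 1 < bins.length then
    if bins.getD i 0 ≤ r ∧ r < bins.getD (i + 1) 0 then some i
    else discretizeInner r bins (i + 1)
  else none
termination_by bins.length - i

def discretize_py (returns : List Int) (bins : List Int) : List Int :=
  returns.foldl (fun out r =>
    match discretizeInner r bins 0 with
    | some i => out ++ [(i : Int)]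
    | none => out) []

-- ===== PORT B =====
-- inner loop of B: still = []; for q in pending: if a <= returns[q] < b: res[q] = i else still.append(q)
def altInner (returns : List Int) (a b : Int) (i : Nat) (pending : List Nat)
    (st : List (Option Int) × List Nat) : List (Option Int) × List Nat :=
  pending.foldl (fun st q =>
    if a ≤ returns.getD q 0 ∧ returns.getD q 0 < b then (st.1.set q (some (i : Int)), st.2)
    else (st.1, st.2 ++ [q])) st

-- outer loop of B: for i in range(len(bins)-1): if not pending: break; …
def altGo (returns : List Int) (bins : List Int) (res : List (Option Int)) (pending : List Nat)
    (i : Nat) : List (Option Int) :=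
  if _h : i + 1 < bins.length then
    if pending = [] then res
    else
      if bins.getD i 0 < bins.getD (i + 1) 0 then
        let st := altInner returns (bins.getD i 0) (bins.getD (i + 1) 0) i pending (res, [])
        altGo returns bins st.1 st.2 (i + 1)
      else altGo returns bins res pending (i + 1)
  else res
termination_by bins.length - i

def discretize_py_alt (returns : List Int) (bins : List Int) : List Int :=
  let res := altGo returns bins (returns.map (fun _ => none)) (List.range returns.length) 0
  res.filterMap id

-- ===== PRECONDITION & SPEC =====
def Spec_discretize_py (returns : List Int) (bins : List Int) (out : List Int) : Prop := out = discretize_py_alt returns bins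
instance (returns : List Int) (bins : List Int) (out : List Int) : Decidable (Spec_discretize_py returns bins out) := by unfold Spec_discretize_py; infer_instance

-- ===== CLAIM (what is proved, stated in full; the proofs are below) =====
def Claim_equal_discretize_py : Prop := ∀ (returns : List Int) (bins : List Int), Dom_discretize_py returns bins → Spec_discretize_py returns bins (discretize_py returns bins)

-- ===== LEMMAS AND PROOFS =====

-- A's fold is a filterMap over the per-value first-match search.
theorem foldl_eq_filterMap (bins : List Int) :
    ∀ (l acc : List Int),
      l.foldl (fun out r =>
        match discretizeInner r bins 0 with
        | some i => out ++ [(i : Int)]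
        | none => out) acc
      = acc ++ l.filterMap (fun r => (discretizeInner r bins 0).map (fun i => (i : Int))) := by
  intro l
  induction l with
  | nil => intro acc; simp
  | cons r rs ih =>
    intro acc
    simp only [List.foldl_cons, List.filterMap_cons]
    cases hx : discretizeInner r bins 0 with
    | none => simpa [hx] using ih acc
    | some q => simp [ih (acc ++ [(q : Int)])]

-- discretizeInner from i is none once i+1 is out of range
theorem inner_stop (r : Int) (bins : List Int) (i : Nat) (h : ¬ i + 1 < bins.length) :
    discretizeInner r bins i = none := by
  rw [discretizeInner]; simp [h]

-- one step of discretizeInner when there is no match at i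
theorem inner_step_nomatch (r : Int) (bins : List Int) (i : Nat)
    (h : ¬ (bins.getD i 0 ≤ r ∧ r < bins.getD (i + 1) 0)) :
    discretizeInner r bins i = discretizeInner r bins (i + 1) := by
  rw [discretizeInner]
  by_cases h1 : i + 1 < bins.length
  · rw [dif_pos h1, if_neg h]
  · rw [dif_neg h1]
    exact (inner_stop r bins (i + 1) (by omega)).symm

-- effect of B's inner pass on the state
theorem altInner_spec (returns : List Int) (a b : Int) (i : Nat) :
    ∀ (pending : List Nat) (res : List (Option Int)) (st0 : List Nat),
      altInner returns a b i pending (res, st0)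
      = (pending.foldl (fun rs q =>
            if a ≤ returns.getD q 0 ∧ returns.getD q 0 < b then rs.set q (some (i : Int)) else rs) res,
         st0 ++ pending.filter (fun q => !(decide (a ≤ returns.getD q 0 ∧ returns.getD q 0 < b)))) := by
  intro pending
  induction pending with
  | nil => intro res st0; simp [altInner]
  | cons q qs ih =>
    intro res st0
    simp only [altInner] at ih ⊢
    rw [List.foldl_cons, List.foldl_cons, List.filter_cons]
    by_cases h : a ≤ returns.getD q 0 ∧ returns.getD q 0 < b
    · have hb : (!(decide (a ≤ returns.getD q 0 ∧ returns.getD q 0 < b))) = false := by rw [decide_eq_true h]; rfl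
      rw [if_pos h, if_pos h, hb]
      simp only [Bool.false_eq_true, if_false]
      exact ih (res.set q (some (i : Int))) st0
    · have hb : (!(decide (a ≤ returns.getD q 0 ∧ returns.getD q 0 < b))) = true := by rw [decide_eq_false h]; rfl
      rw [if_neg h, if_neg h, hb]
      simp only [if_true]
      rw [ih res (st0 ++ [q])]
      simp

-- pointwise effect of the set-fold of altInner_spec
theorem setfold_get (returns : List Int) (a b : Int) (i : Nat) :
    ∀ (pending : List Nat) (res : List (Option Int)) (t : Nat), t < res.length →
      (pending.foldl (fun rs q =>
          if a ≤ returns.getD q 0 ∧ returns.getD q 0 < b then rs.set q (some (i : Int)) else rs) res).getD t none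
      = if t ∈ pending ∧ a ≤ returns.getD t 0 ∧ returns.getD t 0 < b then some (i : Int)
        else res.getD t none := by
  intro pending
  induction pending with
  | nil => intro res t _; rw [List.foldl_nil, if_neg (by simp)]
  | cons q qs ih =>
    intro res t ht
    rw [List.foldl_cons]
    by_cases hq : a ≤ returns.getD q 0 ∧ returns.getD q 0 < b
    · rw [if_pos hq, ih (res.set q (some (i : Int))) t (by simpa using ht)]
      by_cases hc : a ≤ returns.getD t 0 ∧ returns.getD t 0 < b
      · by_cases hm : t ∈ qs
        · rw [if_pos ⟨hm, hc⟩, if_pos ⟨List.mem_cons_of_mem q hm, hc⟩]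
        · rw [if_neg (fun hx => hm hx.1)]
          by_cases hteq : t = q
          · subst hteq
            rw [if_pos ⟨List.mem_cons_self, hc⟩]
            rw [@List.getD_eq_getElem?_getD, List.getElem?_set_eq_of_lt _ ht]
            rfl
          · rw [if_neg (fun hx => (List.mem_cons.mp hx.1).elim hteq hm)]
            rw [@List.getD_eq_getElem?_getD, List.getElem?_set_ne (fun hx => hteq hx.symm),
              ← @List.getD_eq_getElem?_getD]
      · rw [if_neg (fun hx => hc hx.2), if_neg (fun hx => hc hx.2)]
        by_cases hteq : t = q
        · subst hteq; exact absurd hq hc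
        · rw [@List.getD_eq_getElem?_getD, List.getElem?_set_ne (fun hx => hteq hx.symm),
            ← @List.getD_eq_getElem?_getD]
    · rw [if_neg hq, ih res t ht]
      by_cases hc : a ≤ returns.getD t 0 ∧ returns.getD t 0 < b
      · by_cases hm : t ∈ qs
        · rw [if_pos ⟨hm, hc⟩, if_pos ⟨List.mem_cons_of_mem q hm, hc⟩]
        · rw [if_neg (fun hx => hm hx.1)]
          by_cases hteq : t = q
          · subst hteq; exact absurd hc hq
          · rw [if_neg (fun hx => (List.mem_cons.mp hx.1).elim hteq hm)]
      · rw [if_neg (fun hx => hc hx.2), if_neg (fun hx => hc hx.2)]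

-- the set-fold preserves length
theorem setfold_length (returns : List Int) (a b : Int) (i : Nat) :
    ∀ (pending : List Nat) (res : List (Option Int)),
      (pending.foldl (fun rs q =>
          if a ≤ returns.getD q 0 ∧ returns.getD q 0 < b then rs.set q (some (i : Int)) else rs) res).length
      = res.length := by
  intro pending
  induction pending with
  | nil => intro res; rfl
  | cons q qs ih =>
    intro res
    simp only [List.foldl_cons]
    by_cases hq : a ≤ returns.getD q 0 ∧ returns.getD q 0 < b
    · rw [if_pos hq, ih]; simp
    · rw [if_neg hq, ih]

-- main invariant: altGo finishes every query with its first-match answer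
theorem altGo_spec (returns : List Int) (bins : List Int) :
    ∀ (fuel : Nat) (i : Nat) (res : List (Option Int)) (pending : List Nat),
      bins.length - i = fuel →
      res.length = returns.length →
      (∀ q, q ∈ pending → q < returns.length) →
      (∀ q, q < returns.length →
        (q ∈ pending → res.getD q none = none ∧
          discretizeInner (returns.getD q 0) bins 0 = discretizeInner (returns.getD q 0) bins i) ∧
        (q ∉ pending → res.getD q none
          = (discretizeInner (returns.getD q 0) bins 0).map (fun j => (j : Int)))) →
      ∀ t, t < returns.length →
        (altGo returns bins res pending i).getD t none
          = (discretizeInner (returns.getD t 0) bins 0).map (fun j => (j : Int)) := by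
  intro fuel
  induction fuel using Nat.strong_induction_on with
  | _ fuel ih =>
    intro i res pending hfuel hlen hpend hinv t ht
    rw [altGo]
    split_ifs with h1 h2 h3
    · -- pending = []: every query is resolved
      exact (hinv t ht).2 (by simp [h2])
    · -- active interval bins[i] < bins[i+1]
      rw [altInner_spec]
      refine ih (bins.length - (i + 1)) (by omega) (i + 1) _ _ rfl ?_ ?_ ?_ t ht
      · rw [setfold_length]; exact hlen
      · intro q hq
        exact hpend q (List.mem_of_mem_filter hq)
      · intro q hq
        constructor
        · intro hmem
          have hmem' := List.mem_of_mem_filter hmem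
          have hcond : ¬ (bins.getD i 0 ≤ returns.getD q 0 ∧ returns.getD q 0 < bins.getD (i + 1) 0) := by
            intro hc
            have h' := List.of_mem_filter hmem
            rw [decide_eq_true hc] at h'
            simp at h'
          constructor
          · rw [setfold_get returns _ _ i pending res q (hlen ▸ hq), if_neg (by tauto)]
            exact ((hinv q hq).1 hmem').1
          · rw [((hinv q hq).1 hmem').2]
            exact inner_step_nomatch _ bins i hcond
        · intro hmem
          by_cases hmem' : q ∈ pending
          · -- q was just answered at interval i
            have hcond : bins.getD i 0 ≤ returns.getD q 0 ∧ returns.getD q 0 < bins.getD (i + 1) 0 := by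
              by_contra hc
              exact hmem (List.mem_filter.mpr ⟨hmem', by rw [decide_eq_false hc]; rfl⟩)
            rw [setfold_get returns _ _ i pending res q (hlen ▸ hq), if_pos ⟨hmem', hcond⟩]
            rw [((hinv q hq).1 hmem').2]
            rw [discretizeInner, dif_pos h1, if_pos hcond]
            rfl
          · rw [setfold_get returns _ _ i pending res q (hlen ▸ hq), if_neg (by tauto)]
            exact (hinv q hq).2 hmem'
    · -- empty interval: no query can match it
      refine ih (bins.length - (i + 1)) (by omega) (i + 1) res pending rfl hlen hpend ?_ t ht
      intro q hq
      refine ⟨fun hmem => ⟨((hinv q hq).1 hmem).1, ?_⟩, (hinv q hq).2⟩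
      rw [((hinv q hq).1 hmem).2]
      exact inner_step_nomatch _ bins i (by intro hc; omega)
    · -- i + 1 ≥ len(bins): pending queries have no match at all
      by_cases hmem : t ∈ pending
      · rw [((hinv t ht).1 hmem).1, ((hinv t ht).1 hmem).2, inner_stop _ bins i h1]
        rfl
      · exact (hinv t ht).2 hmem

-- altGo preserves the length of res
theorem altGo_length (returns : List Int) (bins : List Int) :
    ∀ (fuel : Nat) (i : Nat) (res : List (Option Int)) (pending : List Nat),
      bins.length - i = fuel → res.length = returns.length →
      (altGo returns bins res pending i).length = returns.length := by
  intro fuel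
  induction fuel using Nat.strong_induction_on with
  | _ fuel ih =>
    intro i res pending hfuel hlen
    rw [altGo]
    split_ifs with h1 h2 h3
    · exact hlen
    · rw [altInner_spec]
      exact ih (bins.length - (i + 1)) (by omega) (i + 1) _ _ rfl (by rw [setfold_length]; exact hlen)
    · exact ih (bins.length - (i + 1)) (by omega) (i + 1) res pending rfl hlen
    · exact hlen

-- the resulting res list is exactly the map of first matches
theorem altRes_eq (returns : List Int) (bins : List Int) :
    altGo returns bins (returns.map (fun _ => none)) (List.range returns.length) 0
      = returns.map (fun r => (discretizeInner r bins 0).map (fun j => (j : Int))) := by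
  have hlen0 : (returns.map (fun _ => (none : Option Int))).length = returns.length := by simp
  have hget := altGo_spec returns bins (bins.length - 0) 0
    (returns.map (fun _ => none)) (List.range returns.length) rfl hlen0
    (fun q hq => List.mem_range.mp hq)
    (fun q hq => ⟨fun _ => ⟨by simp [List.getD_eq_getElem?_getD], rfl⟩,
      fun hmem => absurd (List.mem_range.mpr hq) hmem⟩)
  have hlen : (altGo returns bins (returns.map (fun _ => none)) (List.range returns.length) 0).length
      = returns.length := by
    exact altGo_length returns bins (bins.length - 0) 0 _ _ rfl hlen0
  apply List.ext_getElem (by rw [hlen, List.length_map])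
  intro n h1 h2
  have := hget n (by omega)
  rw [List.getD_eq_getElem?_getD, List.getElem?_eq_getElem h1] at this
  simp only [Option.getD_some] at this
  rw [this]
  simp [List.getD_eq_getElem?_getD,
    List.getElem?_eq_getElem (by simpa using h2 : n < returns.length)]

-- ===== VERDICT (by name: the statement is the Claim_ definition above) =====
theorem discretize_py_spec : Claim_equal_discretize_py := by
  intro returns bins _dom
  unfold Spec_discretize_py discretize_py discretize_py_alt
  rw [foldl_eq_filterMap, altRes_eq]
  simp [List.filterMap_map]
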